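-- pv_equiv track=rewrite | github.com/kovidgoyal/kitty | gen/go_code.py | go_field_type
-- ===== SOURCE A (Python) =====
-- json_field_types: dict[str, str] = {
--     'bool': 'bool', 'str': 'escaped_string', 'list.str': '[]escaped_string', 'dict.str': 'map[escaped_string]escaped_string', 'float': 'float64', 'int': 'int',
--     'scroll_amount': 'any', 'spacing': 'any', 'colors': 'any',
-- }
--
-- def go_field_type(json_field_type: str) -> str:
--     json_field_type = json_field_type.partition('=')[0]
--     q = json_field_types.get(json_field_type)
--     if q:
--         return q
--     if json_field_type.startswith('choices.'):
--         return 'string'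
--     if '.' in json_field_type:
--         p, r = json_field_type.split('.', 1)
--         p = {'list': '[]', 'dict': 'map[string]'}[p]
--         return p + go_field_type(r)
--     raise TypeError(f'Unknown JSON field type: {json_field_type}')
-- ===== SOURCE B (Python) =====
-- json_field_types: dict[str, str] = {
--     'bool': 'bool', 'str': 'escaped_string', 'list.str': '[]escaped_string', 'dict.str': 'map[escaped_string]escaped_string', 'float': 'float64', 'int': 'int',
--     'scroll_amount': 'any', 'spacing': 'any', 'colors': 'any',
-- }
--
-- def go_field_type(json_field_type: str) -> str:
--     parts = json_field_type.partition('=')[0].split('.')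
--     out = ''
--     while True:
--         rest = '.'.join(parts)
--         if rest in json_field_types:
--             return out + json_field_types[rest]
--         if parts[0] == 'choices' and len(parts) > 1:
--             return out + 'string'
--         if len(parts) == 1:
--             raise TypeError(f'Unknown JSON field type: {parts[0]}')
--         out += {'list': '[]', 'dict': 'map[string]'}[parts[0]]
--         parts = parts[1:]
-- ===== Notes on version B (the rewrite author's own statement) =====
-- stated objective: alternative
-- what changed: B splits the '='-stripped string into its dot-separated segments once and runs an iterative loop over that segment list with a string accumulator, re-joining the remaining segments for each table lookup, instead of A's self-recursion that re-scans the raw string for its first dot at every level.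
import Mathlib
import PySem

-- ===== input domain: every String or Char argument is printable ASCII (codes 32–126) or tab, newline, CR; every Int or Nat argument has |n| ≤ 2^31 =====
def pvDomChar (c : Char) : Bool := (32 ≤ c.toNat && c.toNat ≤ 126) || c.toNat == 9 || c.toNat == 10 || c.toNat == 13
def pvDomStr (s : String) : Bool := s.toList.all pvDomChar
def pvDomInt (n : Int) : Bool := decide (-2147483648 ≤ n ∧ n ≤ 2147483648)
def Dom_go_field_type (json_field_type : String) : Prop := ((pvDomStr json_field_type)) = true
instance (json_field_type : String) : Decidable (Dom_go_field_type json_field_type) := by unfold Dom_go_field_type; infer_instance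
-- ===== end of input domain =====

-- B pre-splits the string into dot-separated segments and loops over the segment
-- list with an accumulator, instead of A's first-dot self-recursion on the raw
-- string (objective: alternative decomposition; no speed claim).

-- ===== PORT A =====

-- json_field_types.get(x): the module-level dict, as a chain of equality tests.
def pvTbl (l : List Char) : Option String :=
  if l = "bool".toList then some "bool"
  else if l = "str".toList then some "escaped_string"
  else if l = "list.str".toList then some "[]escaped_string"
  else if l = "dict.str".toList then some "map[escaped_string]escaped_string"
  else if l = "float".toList then some "float64"
  else if l = "int".toList then some "int"
  else if l = "scroll_amount".toList then some "any"
  else if l = "spacing".toList then some "any"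
  else if l = "colors".toList then some "any"
  else none

-- s.split('.', 1): split at the FIRST '.', none when there is no '.' (exact).
def pvSplitDot : List Char → Option (List Char × List Char)
  | [] => none
  | c :: r =>
    if c = '.' then some ([], r)
    else match pvSplitDot r with
      | some (p, q) => some (c :: p, q)
      | none => none

theorem pvSplitDot_eq : ∀ (l p r : List Char), pvSplitDot l = some (p, r) → l = p ++ '.' :: r := by
  intro l
  induction l with
  | nil => intro p r h; simp [pvSplitDot] at h
  | cons c t ih =>
    intro p r h
    by_cases hc : c = '.'
    · simp [pvSplitDot, hc] at h
      simp [hc, ← h.1, ← h.2]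
    · simp [pvSplitDot, hc] at h
      cases hs : pvSplitDot t with
      | none => rw [hs] at h; simp at h
      | some pq =>
        rw [hs] at h
        obtain ⟨p', q'⟩ := pq
        simp at h
        obtain ⟨h1, h2⟩ := h
        simp [← h1, ← h2, ih p' q' hs]

theorem pvSplitDot_len (l p r : List Char) (h : pvSplitDot l = some (p, r)) :
    r.length < l.length := by
  have := pvSplitDot_eq l p r h
  subst this
  simp
  omega

-- Port of A: recursion on the part after the first dot; the KeyError / TypeError
-- branches (excluded by Pre_) return "".
def pvGoA (l : List Char) : String :=
  match pvTbl l with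
  | some q => q
  | none =>
    if ("choices.".toList).isPrefixOf l then "string"
    else match h : pvSplitDot l with
      | some (p, r) =>
        (if p = "list".toList then "[]"
         else if p = "dict".toList then "map[string]" else "") ++ pvGoA r
      | none => ""
termination_by l.length
decreasing_by exact pvSplitDot_len l p r h

-- json_field_type.partition('=')[0] = the part before the first '=' (exact).
def go_field_type (json_field_type : String) : String :=
  pvGoA (json_field_type.toList.takeWhile (· ≠ '='))

-- ===== PORT B =====

-- s.split('.') with no limit: the full segment list (exact; never empty).
def pvSegs : List Char → List (List Char)
  | [] => [[]]
  | c :: r =>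
    if c = '.' then [] :: pvSegs r
    else match pvSegs r with
      | s :: t => (c :: s) :: t
      | [] => [[c]]

-- '.'.join(parts) (exact).
def pvJoin : List (List Char) → List Char
  | [] => []
  | [x] => x
  | x :: xs => x ++ '.' :: pvJoin xs

-- Port of B's while-loop over the remaining segment list, carrying the
-- accumulated Go prefix; the raise branches (excluded by Pre_) return "".
def pvGoB (out : String) : List (List Char) → String
  | [] => ""
  | seg :: rest =>
    match pvTbl (pvJoin (seg :: rest)) with
    | some q => out ++ q
    | none =>
      if seg = "choices".toList ∧ rest ≠ [] then out ++ "string"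
      else if rest = [] then ""
      else if seg = "list".toList then pvGoB (out ++ "[]") rest
      else if seg = "dict".toList then pvGoB (out ++ "map[string]") rest
      else ""

def go_field_type_alt (json_field_type : String) : String :=
  pvGoB "" (pvSegs (json_field_type.toList.takeWhile (· ≠ '=')))

-- ===== PRECONDITION & SPEC =====

-- Grammar check: the '='-stripped type is a chain of 'list.'/'dict.' segments ending
-- in a known key or a 'choices.' tail. Pre_ excludes exactly the strings on which the
-- Python A raises (TypeError for an unknown type, KeyError for a prefix segment other
-- than list/dict); it computes no output of either program.
def pvWellFormed : List Char → Bool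
  | 'l' :: 'i' :: 's' :: 't' :: '.' :: r =>
      (pvTbl ('l' :: 'i' :: 's' :: 't' :: '.' :: r)).isSome || pvWellFormed r
  | 'd' :: 'i' :: 'c' :: 't' :: '.' :: r =>
      (pvTbl ('d' :: 'i' :: 'c' :: 't' :: '.' :: r)).isSome || pvWellFormed r
  | l => (pvTbl l).isSome || ("choices.".toList).isPrefixOf l

-- Pre_ excludes only inputs on which A raises (TypeError/KeyError); B raises the same way there.
def Pre_go_field_type (json_field_type : String) : Prop :=
  pvWellFormed (json_field_type.toList.takeWhile (· ≠ '=')) = true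
instance (json_field_type : String) : Decidable (Pre_go_field_type json_field_type) := by
  unfold Pre_go_field_type; infer_instance

def pvWitness_go_field_type : String := "dict.list.int=3"

def Spec_go_field_type (json_field_type : String) (out : String) : Prop := out = go_field_type_alt json_field_type
instance (json_field_type : String) (out : String) : Decidable (Spec_go_field_type json_field_type out) := by unfold Spec_go_field_type; infer_instance

-- ===== CLAIM (what is proved, stated in full; the proofs are below) =====
def Claim_equal_go_field_type : Prop := ∀ (json_field_type : String), Dom_go_field_type json_field_type → Pre_go_field_type json_field_type → Spec_go_field_type json_field_type (go_field_type json_field_type)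

-- ===== LEMMAS AND PROOFS =====

theorem pvSegs_ne_nil : ∀ l, pvSegs l ≠ [] := by
  intro l
  induction l with
  | nil => simp [pvSegs]
  | cons c r ih =>
    by_cases hc : c = '.'
    · simp [pvSegs, hc]
    · cases hr : pvSegs r with
      | nil => exact absurd hr ih
      | cons s t => simp [pvSegs, hc, hr]

theorem pvSegs_nodot_dot : ∀ p, '.' ∉ p → ∀ r, pvSegs (p ++ '.' :: r) = p :: pvSegs r := by
  intro p
  induction p with
  | nil => intro _ r; simp [pvSegs]
  | cons c q ih =>
    intro hnd r
    have hc : c ≠ '.' := fun h => hnd (by simp [h])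
    have hq : '.' ∉ q := fun h => hnd (by simp [h])
    have := ih hq r
    simp only [List.cons_append, pvSegs, if_neg hc, this]

theorem pvJoin_segs : ∀ l, pvJoin (pvSegs l) = l := by
  intro l
  induction l with
  | nil => simp [pvSegs, pvJoin]
  | cons c r ih =>
    by_cases hc : c = '.'
    · cases hr : pvSegs r with
      | nil => exact absurd hr (pvSegs_ne_nil r)
      | cons s t =>
        rw [hr] at ih
        simp [pvSegs, hc, hr, pvJoin, ih]
    · cases hr : pvSegs r with
      | nil => exact absurd hr (pvSegs_ne_nil r)
      | cons s t =>
        rw [hr] at ih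
        cases t with
        | nil => simp [pvSegs, hc, hr, pvJoin] at ih ⊢; simp [ih]
        | cons u v => simp [pvSegs, hc, hr, pvJoin] at ih ⊢; simp [ih]

theorem pvGoB_eq : ∀ (l : List Char), pvWellFormed l = true →
    ∀ out : String, pvGoB out (pvSegs l) = out ++ pvGoA l := by
  intro l
  induction l using pvWellFormed.induct with
  | case1 r ih =>
    intro hw out
    have hseg : pvSegs ('l' :: 'i' :: 's' :: 't' :: '.' :: r) = "list".toList :: pvSegs r :=
      pvSegs_nodot_dot "list".toList (by decide) r
    have hjoin : pvJoin ("list".toList :: pvSegs r) = ('l' :: 'i' :: 's' :: 't' :: '.' :: r) := by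
      cases hr : pvSegs r with
      | nil => exact absurd hr (pvSegs_ne_nil r)
      | cons s t =>
        have := pvJoin_segs r
        rw [hr] at this
        simp [pvJoin, this]
    cases htbl : pvTbl ('l' :: 'i' :: 's' :: 't' :: '.' :: r) with
    | some q =>
      rw [hseg]
      unfold pvGoB pvGoA
      rw [hjoin, htbl]
    | none =>
      rw [pvWellFormed] at hw
      simp [htbl] at hw
      rw [hseg]
      unfold pvGoB pvGoA
      rw [hjoin, htbl]
      have hs : pvSplitDot ('l' :: 'i' :: 's' :: 't' :: '.' :: r) = some (['l','i','s','t'], r) := rfl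
      rw [hs]
      have hne : pvSegs r ≠ [] := pvSegs_ne_nil r
      simp [hne, ih hw, String.append_assoc]
  | case2 r ih =>
    intro hw out
    have hseg : pvSegs ('d' :: 'i' :: 'c' :: 't' :: '.' :: r) = "dict".toList :: pvSegs r :=
      pvSegs_nodot_dot "dict".toList (by decide) r
    have hjoin : pvJoin ("dict".toList :: pvSegs r) = ('d' :: 'i' :: 'c' :: 't' :: '.' :: r) := by
      cases hr : pvSegs r with
      | nil => exact absurd hr (pvSegs_ne_nil r)
      | cons s t =>
        have := pvJoin_segs r
        rw [hr] at this
        simp [pvJoin, this]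
    cases htbl : pvTbl ('d' :: 'i' :: 'c' :: 't' :: '.' :: r) with
    | some q =>
      rw [hseg]
      unfold pvGoB pvGoA
      rw [hjoin, htbl]
    | none =>
      rw [pvWellFormed] at hw
      simp [htbl] at hw
      rw [hseg]
      unfold pvGoB pvGoA
      rw [hjoin, htbl]
      have hs : pvSplitDot ('d' :: 'i' :: 'c' :: 't' :: '.' :: r) = some (['d','i','c','t'], r) := rfl
      rw [hs]
      have hne : pvSegs r ≠ [] := pvSegs_ne_nil r
      simp [hne, ih hw, String.append_assoc]
  | case3 l h1 h2 =>
    intro hw out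
    cases htbl : pvTbl l with
    | some q =>
      cases hsr : pvSegs l with
      | nil => exact absurd hsr (pvSegs_ne_nil l)
      | cons seg rest =>
        have hjoin : pvJoin (seg :: rest) = l := by rw [← hsr, pvJoin_segs]
        unfold pvGoB pvGoA
        rw [hjoin, htbl]
    | none =>
      rw [pvWellFormed] at hw
      · simp [htbl] at hw
        obtain ⟨t, ht⟩ : ∃ t, l = "choices.".toList ++ t := by
          obtain ⟨t, ht⟩ := hw
          exact ⟨t, ht.symm⟩
        subst ht
        have hseg : pvSegs ("choices.".toList ++ t) = "choices".toList :: pvSegs t := by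
          rw [show ("choices.".toList : List Char) ++ t = "choices".toList ++ '.' :: t from rfl]
          exact pvSegs_nodot_dot "choices".toList (by decide) t
        rw [hseg]
        have hjoin : pvJoin ("choices".toList :: pvSegs t) = "choices.".toList ++ t := by
          rw [← hseg, pvJoin_segs]
        unfold pvGoB pvGoA
        rw [hjoin, htbl]
        have hne : pvSegs t ≠ [] := pvSegs_ne_nil t
        simp [hne]
      · exact h1
      · exact h2

-- ===== VERDICT (by name: the statement is the Claim_ definition above) =====
theorem go_field_type_spec : Claim_equal_go_field_type := by
  intro s _ hpre
  unfold Spec_go_field_type go_field_type go_field_type_alt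
  rw [pvGoB_eq _ hpre ""]
  simp
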